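-- pv_equiv track=rewrite | github.com/Hugo-Liang93/MT5Services | src/api/admin_routes/strategies.py | _sorted_texts
-- ===== SOURCE A (Python) =====
-- from typing import Any, Dict, List
--
-- def _sorted_texts(values: Any) -> list[str]:
--     if not isinstance(values, (list, tuple, set)):
--         return []
--     seen: set[str] = set()
--     result: list[str] = []
--     for value in values:
--         text = str(value).strip()
--         if not text or text in seen:
--             continue
--         seen.add(text)
--         result.append(text)
--     result.sort()
--     return result
-- ===== SOURCE B (Python) =====
-- from typing import Any
--
-- def _sorted_texts(values: Any) -> list[str]:
--     if not isinstance(values, (list, tuple, set)):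
--         return []
--     texts = sorted(str(v).strip() for v in values if str(v).strip())
--     result: list[str] = []
--     prev = None
--     for t in texts:
--         if t != prev:
--             result.append(t)
--             prev = t
--     return result
-- ===== Notes on version B (the rewrite author's own statement) =====
-- stated objective: alternative
-- what changed: Eliminates the hash set: B collects all non-empty stripped strings (duplicates kept), sorts them, and dedups in a single post-sort pass that compares each element with the previously kept one, so dedup happens by adjacency after sorting instead of by set membership before it.
import Mathlib
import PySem

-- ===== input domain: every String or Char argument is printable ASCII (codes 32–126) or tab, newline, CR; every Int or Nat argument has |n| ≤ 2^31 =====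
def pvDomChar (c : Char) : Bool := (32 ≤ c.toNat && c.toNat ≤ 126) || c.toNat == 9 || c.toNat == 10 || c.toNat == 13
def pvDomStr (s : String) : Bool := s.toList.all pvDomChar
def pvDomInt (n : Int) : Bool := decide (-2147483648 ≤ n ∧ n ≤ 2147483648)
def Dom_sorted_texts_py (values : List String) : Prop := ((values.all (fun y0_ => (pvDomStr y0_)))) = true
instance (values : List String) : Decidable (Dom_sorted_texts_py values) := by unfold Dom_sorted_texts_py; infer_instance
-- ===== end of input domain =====

-- B eliminates the seen-set: it sorts the non-empty stripped strings first and removes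
-- duplicates in one post-sort adjacency pass (objective: alternative decomposition).


-- ===== PORT A =====
-- literal port of _sorted_texts: the isinstance guard is always true for List String;
-- pvStepA is one iteration of A's loop over state (seen, result)
def pvStepA (st : PySem.Set String × List String) (value : String) :
    PySem.Set String × List String :=
  let text := PySem.Str.strip value
  if text = "" ∨ PySem.Set.contains st.1 text = true then st
  else (PySem.Set.add st.1 text, st.2 ++ [text])

def sorted_texts_py (values : List String) : List String :=
  let st := values.foldl pvStepA (PySem.Set.empty, [])
  PySem.List.sorted st.2 (fun x => x) false

-- ===== PORT B =====
-- literal port of Source B: sort the non-empty stripped strings, then drop adjacent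
-- duplicates; pvStepB is one iteration of B's pass over state (prev, result)
def pvStepB (st : Option String × List String) (t : String) :
    Option String × List String :=
  if some t ≠ st.1 then (some t, st.2 ++ [t]) else st

def sorted_texts_py_alt (values : List String) : List String :=
  let texts := PySem.List.sorted
    ((values.map (fun v => PySem.Str.strip v)).filter (fun t => decide (t ≠ "")))
    (fun x => x) false
  (texts.foldl pvStepB (none, [])).2

-- ===== PRECONDITION & SPEC =====
def Spec_sorted_texts_py (values : List String) (out : List String) : Prop := out = sorted_texts_py_alt values
instance (values : List String) (out : List String) : Decidable (Spec_sorted_texts_py values out) := by unfold Spec_sorted_texts_py; infer_instance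

-- ===== CLAIM (what is proved, stated in full; the proofs are below) =====
def Claim_equal_sorted_texts_py : Prop := ∀ (values : List String), Dom_sorted_texts_py values → Spec_sorted_texts_py values (sorted_texts_py values)

-- ===== LEMMAS AND PROOFS =====

-- A's loop keeps seen = result, and both equal the Set.add-fold of the filtered stripped texts
theorem sortedTexts_A_loop (vs : List String) (s : PySem.Set String) :
    vs.foldl pvStepA (s, s)
    = (((vs.map (fun v => PySem.Str.strip v)).filter (fun t => decide (t ≠ ""))).foldl
        PySem.Set.add s,
       ((vs.map (fun v => PySem.Str.strip v)).filter (fun t => decide (t ≠ ""))).foldl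
        PySem.Set.add s) := by
  induction vs generalizing s with
  | nil => simp
  | cons v vs ih =>
    by_cases he : PySem.Str.strip v = ""
    · have h1 : pvStepA (s, s) v = (s, s) := by simp [pvStepA, he]
      rw [List.foldl_cons, h1, ih]
      simp [he]
    · have h1 : pvStepA (s, s) v
          = (PySem.Set.add s (PySem.Str.strip v), PySem.Set.add s (PySem.Str.strip v)) := by
        by_cases hm : PySem.Str.strip v ∈ s <;> simp [pvStepA, PySem.Set.add, he, hm]
      rw [List.foldl_cons, h1, ih]
      simp [he]

-- B's loop as a structural recursion (adjacent-duplicate removal)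
def pvAdj : Option String → List String → List String
  | _, [] => []
  | prev, t :: ts => if some t ≠ prev then t :: pvAdj (some t) ts else pvAdj prev ts

theorem sortedTexts_B_loop (xs : List String) (prev : Option String) (out : List String) :
    (xs.foldl pvStepB (prev, out)).2 = out ++ pvAdj prev xs := by
  induction xs generalizing prev out with
  | nil => simp [pvAdj]
  | cons t ts ih =>
    by_cases h : some t = prev
    · have h1 : pvStepB (prev, out) t = (prev, out) := by simp [pvStepB, h]
      rw [List.foldl_cons, h1, ih]
      simp [pvAdj, h]
    · have h1 : pvStepB (prev, out) t = (some t, out ++ [t]) := by simp [pvStepB, h]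
      rw [List.foldl_cons, h1, ih]
      simp [pvAdj, h]

-- on a sorted list, the adjacency pass yields a strictly increasing list containing
-- exactly the elements differing from prev
theorem pvAdj_spec (xs : List String) (prev : Option String)
    (hs : xs.Pairwise (· ≤ ·)) (hp : ∀ x ∈ xs, ∀ p, prev = some p → p ≤ x) :
    (pvAdj prev xs).Pairwise (· < ·) ∧
    (∀ a, a ∈ pvAdj prev xs ↔ a ∈ xs ∧ ∀ p, prev = some p → a ≠ p) := by
  induction xs generalizing prev with
  | nil => simp [pvAdj]
  | cons t ts ih =>
    rcases List.pairwise_cons.mp hs with ⟨hle, hs'⟩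
    by_cases h : some t = prev
    · -- t equals prev: it is dropped
      obtain ⟨p, hpeq⟩ : ∃ p, prev = some p := ⟨t, h.symm⟩
      have htp : t = p := by rw [hpeq] at h; exact Option.some.inj h
      have hp' : ∀ x ∈ ts, ∀ q, prev = some q → q ≤ x := by
        intro x hx q hq
        rw [hpeq] at hq
        exact (Option.some.inj hq) ▸ (htp ▸ hle x hx)
      obtain ⟨h1, h2⟩ := ih prev hs' hp'
      refine ⟨by simpa [pvAdj, h] using h1, ?_⟩
      intro a
      rw [show pvAdj prev (t :: ts) = pvAdj prev ts by simp [pvAdj, h], h2 a]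
      constructor
      · rintro ⟨ha, hne⟩; exact ⟨List.mem_cons_of_mem _ ha, hne⟩
      · rintro ⟨ha, hne⟩
        rcases List.mem_cons.mp ha with rfl | ha'
        · exact absurd rfl (htp ▸ hne p hpeq)
        · exact ⟨ha', hne⟩
    · -- t differs from prev: it is kept, recursion with prev := some t
      have hp' : ∀ x ∈ ts, ∀ q, (some t : Option String) = some q → q ≤ x := by
        intro x hx q hq
        exact (Option.some.inj hq) ▸ hle x hx
      obtain ⟨h1, h2⟩ := ih (some t) hs' hp'
      have hkeep : pvAdj prev (t :: ts) = t :: pvAdj (some t) ts := by simp [pvAdj, h]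
      constructor
      · rw [hkeep]
        refine List.pairwise_cons.mpr ⟨?_, h1⟩
        intro a ha
        obtain ⟨ha', hne⟩ := (h2 a).mp ha
        exact lt_of_le_of_ne (hle a ha') (Ne.symm (hne t rfl))
      · intro a
        rw [hkeep]
        constructor
        · intro ha
          rcases List.mem_cons.mp ha with rfl | ha'
          · refine ⟨List.mem_cons_self, ?_⟩
            intro p hpeq rfl
            exact h (hpeq.symm)
          · obtain ⟨hmem, hne⟩ := (h2 a).mp ha'
            refine ⟨List.mem_cons_of_mem _ hmem, ?_⟩
            intro p hpeq
            have hpt : p ≤ t := hp t List.mem_cons_self p hpeq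
            have hpt' : p ≠ t := fun hh => h (by rw [hpeq, hh])
            have hta : t ≤ a := hle a hmem
            intro hap
            exact hpt' (le_antisymm hpt (hap ▸ hta))
        · rintro ⟨ha, hne⟩
          by_cases hat : a = t
          · exact hat ▸ List.mem_cons_self
          · rcases List.mem_cons.mp ha with rfl | ha'
            · exact absurd rfl hat
            · exact List.mem_cons_of_mem _
                ((h2 a).mpr ⟨ha', fun p hpeq => (Option.some.inj hpeq) ▸ fun hh => hat hh⟩)

theorem sorted_texts_eq (values : List String) :
    sorted_texts_py values = sorted_texts_py_alt values := by
  show PySem.List.sorted (values.foldl pvStepA (PySem.Set.empty, PySem.Set.empty)).2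
        (fun x => x) false
      = ((PySem.List.sorted
            ((values.map (fun v => PySem.Str.strip v)).filter (fun t => decide (t ≠ "")))
            (fun x => x) false).foldl pvStepB (none, [])).2
  set L := (values.map (fun v => PySem.Str.strip v)).filter (fun t => decide (t ≠ "")) with hL
  -- A's result is sorted(set-of-L)
  rw [sortedTexts_A_loop values PySem.Set.empty]
  rw [sortedTexts_B_loop]
  simp only [List.nil_append]
  set S := PySem.List.sorted L (fun x => x) false with hS
  have hsp : S.Pairwise (· ≤ ·) := PySem.List.sorted_pairwise L (fun x => x)
  obtain ⟨hlt, hmem⟩ := pvAdj_spec S none hsp (by intro x _ p hp; cases hp)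
  have hofl : L.foldl PySem.Set.add PySem.Set.empty = PySem.Set.ofList L := by
    rw [PySem.Set.ofList_eq_foldl]; rfl
  rw [hofl]
  apply PySem.List.sorted_eq_of_perm_of_pairwise_lt
  · have hnd : (pvAdj none S).Nodup := hlt.imp (fun h => ne_of_lt h)
    rw [List.perm_ext_iff_of_nodup hnd (PySem.Set.nodup_ofList L)]
    intro a
    rw [hmem a, PySem.Set.mem_ofList, PySem.List.mem_sorted]
    simp
  · exact hlt

-- ===== VERDICT (by name: the statement is the Claim_ definition above) =====
theorem sorted_texts_py_spec : Claim_equal_sorted_texts_py := by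
  intro values _
  exact sorted_texts_eq values
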